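-- pv_equiv track=rewrite | github.com/sheronjayaratne-hub/Fibonacci_Generator | App_Fibonacci.py | find_fibonacci_position
-- ===== SOURCE A (Python) =====
-- def find_fibonacci_position(num):
--     """Find the position of a Fibonacci number in the sequence"""
--     a, b = 0, 1
--     position = 0
--     while a <= num:
--         if a == num:
--             return position
--         a, b = b, a + b
--         position += 1
--     return -1
-- ===== SOURCE B (Python) =====
-- def find_fibonacci_position(num):
--     """Find the position of a Fibonacci number in the sequence"""
--     fibs = []
--     a, b = 0, 1
--     while a <= num:
--         fibs.append(a)
--         a, b = b, a + b
--     return fibs.index(num) if num in fibs else -1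
-- ===== Notes on version B (the rewrite author's own statement) =====
-- stated objective: alternative
-- what changed: B separates generation from search: it first builds the full table of Fibonacci numbers up to num, then answers by membership test plus first-occurrence list.index, instead of A's fused single-pass loop with an early return.
import Mathlib
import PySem

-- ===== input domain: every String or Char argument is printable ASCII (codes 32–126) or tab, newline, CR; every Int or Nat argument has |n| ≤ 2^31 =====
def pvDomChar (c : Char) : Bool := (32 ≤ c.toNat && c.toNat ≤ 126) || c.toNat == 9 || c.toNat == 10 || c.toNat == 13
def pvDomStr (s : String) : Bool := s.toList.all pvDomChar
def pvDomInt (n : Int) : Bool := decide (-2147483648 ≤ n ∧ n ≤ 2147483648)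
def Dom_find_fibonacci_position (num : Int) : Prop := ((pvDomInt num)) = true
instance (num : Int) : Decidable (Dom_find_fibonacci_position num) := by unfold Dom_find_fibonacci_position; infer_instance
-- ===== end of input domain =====

-- B separates generation (build the table of Fibonacci numbers ≤ num) from search
-- (membership test + first-occurrence index), instead of A's fused early-exit loop.

-- ===== PORT A =====
-- A's while loop, as structural recursion on a fuel bound (100 iterations suffice:
-- Fibonacci numbers exceed 2^31 well before index 100, so the loop guard fails first).
def pvLoopA (fuel : Nat) (a b pos num : Int) : Int :=
  match fuel with
  | 0 => -1
  | f + 1 =>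
    if a ≤ num then
      if a = num then pos
      else pvLoopA f b (a + b) (pos + 1) num
    else -1

def find_fibonacci_position (num : Int) : Int := pvLoopA 100 0 1 0 num

-- ===== PORT B =====
-- B's generation loop: append a while a ≤ num.
def pvGenB (fuel : Nat) (a b num : Int) (acc : List Int) : List Int :=
  match fuel with
  | 0 => acc
  | f + 1 =>
    if a ≤ num then pvGenB f b (a + b) num (acc ++ [a])
    else acc

def find_fibonacci_position_alt (num : Int) : Int :=
  let fibs := pvGenB 100 0 1 num []
  if num ∈ fibs then
    match PySem.List.index? fibs num with
    | some i => (i : Int)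
    | none => -1
  else -1

-- ===== PRECONDITION & SPEC =====
def Spec_find_fibonacci_position (num : Int) (out : Int) : Prop := out = find_fibonacci_position_alt num
instance (num : Int) (out : Int) : Decidable (Spec_find_fibonacci_position num out) := by unfold Spec_find_fibonacci_position; infer_instance

-- ===== CLAIM (what is proved, stated in full; the proofs are below) =====
def Claim_equal_find_fibonacci_position : Prop := ∀ (num : Int), Dom_find_fibonacci_position num → Spec_find_fibonacci_position num (find_fibonacci_position num)

-- ===== LEMMAS AND PROOFS =====

-- accumulator-free view of B's generation loop
def pvGen0 (fuel : Nat) (a b num : Int) : List Int :=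
  match fuel with
  | 0 => []
  | f + 1 =>
    if a ≤ num then a :: pvGen0 f b (a + b) num
    else []

theorem pvGenB_eq (fuel : Nat) : ∀ (a b num : Int) (acc : List Int),
    pvGenB fuel a b num acc = acc ++ pvGen0 fuel a b num := by
  induction fuel with
  | zero => intro a b num acc; simp [pvGenB, pvGen0]
  | succ f ih =>
    intro a b num acc
    simp only [pvGenB, pvGen0]
    split
    · rw [ih]; simp
    · simp

theorem pvLoopA_eq_index (fuel : Nat) : ∀ (a b pos num : Int),
    pvLoopA fuel a b pos num =
      match PySem.List.index? (pvGen0 fuel a b num) num with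
      | some i => pos + (i : Int)
      | none => -1 := by
  induction fuel with
  | zero => intro a b pos num; simp [pvLoopA, pvGen0, PySem.List.index?]
  | succ f ih =>
    intro a b pos num
    simp only [pvLoopA, pvGen0]
    split
    · by_cases h : a = num
      · subst h
        rw [PySem.List.index?_cons_self]
        simp
      · rw [if_neg h, PySem.List.index?_cons_of_ne _ h, ih]
        cases PySem.List.index? (pvGen0 f b (a + b) num) num with
        | none => simp
        | some i => simp; ring
    · simp [PySem.List.index?]

-- ===== VERDICT (by name: the statement is the Claim_ definition above) =====
theorem find_fibonacci_position_spec : Claim_equal_find_fibonacci_position := by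
  intro num _
  unfold Spec_find_fibonacci_position find_fibonacci_position find_fibonacci_position_alt
  rw [pvLoopA_eq_index, pvGenB_eq]
  simp only [List.nil_append]
  cases hidx : PySem.List.index? (pvGen0 100 0 1 num) num with
  | none =>
    have hmem : num ∉ pvGen0 100 0 1 num := (PySem.List.index?_eq_none_iff _ _).mp hidx
    simp [hmem]
  | some i =>
    have hmem : num ∈ pvGen0 100 0 1 num := by
      rw [← PySem.List.index?_isSome_iff, hidx]; rfl
    simp [hmem]
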